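-- pv_equiv track=rewrite | github.com/FelixSciFi/LLLB | scripts/retokenize_sentences.py | _merge_whitespace_prefix_into_following_word
-- ===== SOURCE A (Python) =====
-- def _merge_whitespace_prefix_into_following_word(
--     pieces: list[tuple[str, int, int]], seg: str
-- ) -> list[tuple[str, int, int]]:
--     """Avoid a token that is only spaces (e.g. legacy ` aujourd'hui` → ` aujourd'hui` one word chunk)."""
--     out: list[tuple[str, int, int]] = []
--     i = 0
--     while i < len(pieces):
--         typ, s, e = pieces[i]
--         if (
--             typ == "p"
--             and i + 1 < len(pieces)
--             and pieces[i + 1][0] == "w"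
--             and seg[s:e].strip() == ""
--             and seg[s:e]
--         ):
--             _, ws, we = pieces[i + 1]
--             out.append(("w", s, we))
--             i += 2
--             continue
--         out.append(pieces[i])
--         i += 1
--     return out
-- ===== SOURCE B (Python) =====
-- def _merge_whitespace_prefix_into_following_word(
--     pieces: list[tuple[str, int, int]], seg: str
-- ) -> list[tuple[str, int, int]]:
--     """Single forward pass carrying a pending whitespace-only 'p' prefix, no index look-ahead."""
--     def is_ws(s: int, e: int) -> bool:
--         sub = seg[s:e]
--         return sub.strip() == "" and bool(sub)
--
--     out: list[tuple[str, int, int]] = []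
--     pending = None  # (s, e) of a stashed whitespace-only "p" token
--     for typ, s, e in pieces:
--         if pending is not None and typ == "w":
--             out.append(("w", pending[0], e))
--             pending = None
--             continue
--         if pending is not None:
--             out.append(("p", pending[0], pending[1]))
--             pending = None
--         if typ == "p" and is_ws(s, e):
--             pending = (s, e)
--         else:
--             out.append((typ, s, e))
--     if pending is not None:
--         out.append(("p", pending[0], pending[1]))
--     return out
-- ===== Notes on version B (the rewrite author's own statement) =====
-- stated objective: alternative
-- what changed: Replaced the index-based while loop with i+=2 look-ahead by a single forward pass that carries an optional pending whitespace-only prefix and merges or flushes it on the following token.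
import Mathlib
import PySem

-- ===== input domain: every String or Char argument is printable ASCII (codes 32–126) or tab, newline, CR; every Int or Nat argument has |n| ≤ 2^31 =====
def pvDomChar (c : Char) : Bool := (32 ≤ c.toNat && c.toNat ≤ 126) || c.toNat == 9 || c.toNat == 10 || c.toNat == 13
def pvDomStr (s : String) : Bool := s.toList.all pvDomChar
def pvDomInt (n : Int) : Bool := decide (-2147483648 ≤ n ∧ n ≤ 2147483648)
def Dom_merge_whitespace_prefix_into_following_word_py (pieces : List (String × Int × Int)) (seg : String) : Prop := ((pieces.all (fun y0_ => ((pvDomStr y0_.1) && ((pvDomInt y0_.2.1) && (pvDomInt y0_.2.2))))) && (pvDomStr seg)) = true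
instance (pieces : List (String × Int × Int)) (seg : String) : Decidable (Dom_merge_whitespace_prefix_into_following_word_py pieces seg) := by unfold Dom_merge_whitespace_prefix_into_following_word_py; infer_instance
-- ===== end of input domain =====

-- B replaces A's index-with-look-ahead while loop by a single forward pass that carries a
-- pending whitespace-only "p" prefix (objective: alternative decomposition, same O(n) cost).

-- ===== PORT A =====
-- seg[s:e].strip() == "" and seg[s:e]  (the non-empty, whitespace-only test of the Python condition)
def pvWsSpan (seg : String) (s e : Int) : Bool :=
  let sub := PySem.Str.slice seg (some s) (some e)
  (PySem.Str.strip sub == "") && !(sub == "")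

-- literal transliteration of A's while loop: recursion on the piece list with one-piece look-ahead
def merge_whitespace_prefix_into_following_word_py (pieces : List (String × Int × Int)) (seg : String) : List (String × Int × Int) :=
  mergeA seg pieces
where
  mergeA (seg : String) : List (String × Int × Int) → List (String × Int × Int)
    | [] => []
    | (typ, s, e) :: rest =>
      match rest with
      | (t2, _ws, we) :: rest2 =>
        if typ == "p" && t2 == "w" && pvWsSpan seg s e then
          ("w", s, we) :: mergeA seg rest2
        else
          (typ, s, e) :: mergeA seg ((t2, _ws, we) :: rest2)
      | [] => [(typ, s, e)]

-- ===== PORT B =====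
-- B's loop: state = optional pending (s,e) of a stashed whitespace-only "p" token
def mergeAltLoop (seg : String) (pending : Option (Int × Int)) : List (String × Int × Int) → List (String × Int × Int)
  | [] =>
    match pending with
    | some (ps, pe) => [("p", ps, pe)]
    | none => []
  | (typ, s, e) :: rest =>
    match pending with
    | some (ps, pe) =>
      if typ == "w" then
        ("w", ps, e) :: mergeAltLoop seg none rest
      else
        ("p", ps, pe) ::
          (if typ == "p" && pvWsSpan seg s e then
            mergeAltLoop seg (some (s, e)) rest
          else
            (typ, s, e) :: mergeAltLoop seg none rest)
    | none =>
      if typ == "p" && pvWsSpan seg s e then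
        mergeAltLoop seg (some (s, e)) rest
      else
        (typ, s, e) :: mergeAltLoop seg none rest

def merge_whitespace_prefix_into_following_word_py_alt (pieces : List (String × Int × Int)) (seg : String) : List (String × Int × Int) :=
  mergeAltLoop seg none pieces

-- ===== PRECONDITION & SPEC =====
def Spec_merge_whitespace_prefix_into_following_word_py (pieces : List (String × Int × Int)) (seg : String) (out : List (String × Int × Int)) : Prop := out = merge_whitespace_prefix_into_following_word_py_alt pieces seg
instance (pieces : List (String × Int × Int)) (seg : String) (out : List (String × Int × Int)) : Decidable (Spec_merge_whitespace_prefix_into_following_word_py pieces seg out) := by unfold Spec_merge_whitespace_prefix_into_following_word_py; infer_instance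

-- ===== CLAIM (what is proved, stated in full; the proofs are below) =====
def Claim_equal_merge_whitespace_prefix_into_following_word_py : Prop := ∀ (pieces : List (String × Int × Int)) (seg : String), Dom_merge_whitespace_prefix_into_following_word_py pieces seg → Spec_merge_whitespace_prefix_into_following_word_py pieces seg (merge_whitespace_prefix_into_following_word_py pieces seg)

-- ===== LEMMAS AND PROOFS =====
-- A skips a piece unchanged whenever the stash test fails on it
lemma mergeA_cons_of_not_stash (seg : String) (typ : String) (s e : Int)
    (rest : List (String × Int × Int))
    (h : (typ == "p" && pvWsSpan seg s e) = false) :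
    merge_whitespace_prefix_into_following_word_py.mergeA seg ((typ, s, e) :: rest)
      = (typ, s, e) :: merge_whitespace_prefix_into_following_word_py.mergeA seg rest := by
  cases rest with
  | nil => rfl
  | cons hd tl =>
    obtain ⟨t2, w, we⟩ := hd
    simp only [merge_whitespace_prefix_into_following_word_py.mergeA]
    have : (typ == "p" && t2 == "w" && pvWsSpan seg s e) = false := by
      cases hp : (typ == "p") <;> cases hw : pvWsSpan seg s e <;> simp_all
    simp [this]

-- loop invariant: B's pass with pending state tracks A's look-ahead recursion
lemma mergeAltLoop_eq (seg : String) (ps : List (String × Int × Int)) :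
    (mergeAltLoop seg none ps = merge_whitespace_prefix_into_following_word_py.mergeA seg ps)
    ∧ (∀ s e : Int, pvWsSpan seg s e = true →
        mergeAltLoop seg (some (s, e)) ps
          = merge_whitespace_prefix_into_following_word_py.mergeA seg (("p", s, e) :: ps)) := by
  induction ps with
  | nil =>
    refine ⟨rfl, fun s e _ => ?_⟩
    rfl
  | cons hd tl ih =>
    obtain ⟨typ, s, e⟩ := hd
    obtain ⟨ihn, ihs⟩ := ih
    constructor
    · simp only [mergeAltLoop]
      by_cases hc : (typ == "p" && pvWsSpan seg s e) = true
      · have hp : typ = "p" := by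
          have := (Bool.and_eq_true _ _).mp hc
          exact eq_of_beq this.1
        have hw : pvWsSpan seg s e = true := ((Bool.and_eq_true _ _).mp hc).2
        rw [if_pos hc, ihs s e hw, hp]
      · rw [Bool.not_eq_true] at hc
        rw [if_neg (by simp [hc]), ihn, mergeA_cons_of_not_stash seg typ s e tl hc]
    · intro ps pe hws
      simp only [mergeAltLoop]
      by_cases hw : (typ == "w") = true
      · have ht : typ = "w" := eq_of_beq hw
        rw [if_pos hw]
        simp only [merge_whitespace_prefix_into_following_word_py.mergeA, ht]
        simp [hws, ihn]
      · rw [Bool.not_eq_true] at hw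
        rw [if_neg (by simp [hw])]
        have hA : merge_whitespace_prefix_into_following_word_py.mergeA seg
            (("p", ps, pe) :: (typ, s, e) :: tl)
            = ("p", ps, pe) :: merge_whitespace_prefix_into_following_word_py.mergeA seg ((typ, s, e) :: tl) := by
          simp only [merge_whitespace_prefix_into_following_word_py.mergeA]
          simp [hw]
        rw [hA]
        by_cases hc : (typ == "p" && pvWsSpan seg s e) = true
        · have hp : typ = "p" := eq_of_beq ((Bool.and_eq_true _ _).mp hc).1
          have hws2 : pvWsSpan seg s e = true := ((Bool.and_eq_true _ _).mp hc).2
          rw [if_pos hc, ihs s e hws2, hp]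
        · rw [Bool.not_eq_true] at hc
          rw [if_neg (by simp [hc]), ihn, mergeA_cons_of_not_stash seg typ s e tl hc]

-- ===== VERDICT (by name: the statement is the Claim_ definition above) =====
theorem merge_whitespace_prefix_into_following_word_py_spec : Claim_equal_merge_whitespace_prefix_into_following_word_py := by
  intro pieces seg _
  unfold Spec_merge_whitespace_prefix_into_following_word_py
  unfold merge_whitespace_prefix_into_following_word_py merge_whitespace_prefix_into_following_word_py_alt
  exact (mergeAltLoop_eq seg pieces).1.symm
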